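-- pv_equiv track=rewrite | github.com/colinpearse/advent-of-code-2019 | aofc2019.q10.py | remove_hidden
-- ===== SOURCE A (Python) =====
-- def lfactor(x, y):
--     while(y):
--         x,y = y,x%y
--     return x
--
-- def reduce_offset(x,y):
--     lf = abs(lfactor(x,y))
--     return int(x/lf), int(y/lf)
--
-- def remove_hidden(noff, ast, relship, xlen, ylen):
--     xguess,yguess = ast[0],ast[1]
--     xoff,yoff = reduce_offset(noff[0],noff[1])
--     for i in range(max(xlen,ylen)):
--         xguess += xoff
--         yguess += yoff
--         guess = (xguess,yguess)
--         if guess in relship: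
--             del relship[guess]
--     return relship
-- ===== SOURCE B (Python) =====
-- def lfactor(x, y):
--     while(y):
--         x,y = y,x%y
--     return x
--
-- def reduce_offset(x,y):
--     lf = abs(lfactor(x,y))
--     return int(x/lf), int(y/lf)
--
-- def remove_hidden(noff, ast, relship, xlen, ylen):
--     # One pass over a snapshot of the keys instead of stepping along the ray:
--     # a key is deleted iff it is ast + k*(xoff,yoff) for an integer 1 <= k <= max(xlen,ylen).
--     xoff, yoff = reduce_offset(noff[0], noff[1])
--     m = max(xlen, ylen)
--     for gx, gy in list(relship):
--         dx, dy = gx - ast[0], gy - ast[1]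
--         if xoff != 0:
--             k, r = divmod(dx, xoff)
--         else:
--             k, r = divmod(dy, yoff)
--         if r == 0 and 1 <= k <= m and dx == k * xoff and dy == k * yoff:
--             del relship[(gx, gy)]
--     return relship
-- ===== Notes on version B (the rewrite author's own statement) =====
-- stated objective: faster
-- what changed: Instead of stepping max(xlen,ylen) times along the ray and probing the dict at each step, B makes one pass over the dict's keys and deletes a key iff it equals ast + k*offset for some integer 1 <= k <= max(xlen,ylen), decided arithmetically via divmod.
-- outside the precondition, e.g. on remove_hidden((0, 0), (0, 0), {}, 3, 3): A raises ZeroDivisionError, B raises ZeroDivisionError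
import Mathlib
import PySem

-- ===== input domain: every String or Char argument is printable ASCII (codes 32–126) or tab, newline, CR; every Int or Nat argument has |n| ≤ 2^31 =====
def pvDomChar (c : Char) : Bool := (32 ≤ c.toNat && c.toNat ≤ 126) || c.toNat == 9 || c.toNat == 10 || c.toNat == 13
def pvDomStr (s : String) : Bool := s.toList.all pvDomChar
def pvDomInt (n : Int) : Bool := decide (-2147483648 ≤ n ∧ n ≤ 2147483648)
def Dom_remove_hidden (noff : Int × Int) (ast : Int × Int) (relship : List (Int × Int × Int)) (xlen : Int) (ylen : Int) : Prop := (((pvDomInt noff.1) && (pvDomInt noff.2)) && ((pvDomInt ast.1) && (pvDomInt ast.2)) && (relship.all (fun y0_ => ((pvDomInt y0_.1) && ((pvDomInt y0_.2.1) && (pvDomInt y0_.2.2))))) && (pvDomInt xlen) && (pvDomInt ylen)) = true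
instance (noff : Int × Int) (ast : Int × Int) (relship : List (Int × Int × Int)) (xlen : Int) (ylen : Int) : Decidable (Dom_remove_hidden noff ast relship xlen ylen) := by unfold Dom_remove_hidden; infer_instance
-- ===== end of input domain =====

-- B replaces A's walk along the ray (one dict probe per step) by a single pass over the
-- dict's keys with an arithmetic on-the-ray test; equivalence is about the RETURN value
-- (both Pythons mutate relship in place and return it).

-- ===== PORT A =====

-- termination of the gcd loop (cited by pvLfactor's decreasing_by)
theorem pvModNatAbsLt (x y : Int) (h : y ≠ 0) : (PySem.Int.mod x y).natAbs < y.natAbs := by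
  rcases lt_trichotomy y 0 with hy | hy | hy
  · have h1 := PySem.Int.mod_neg_bounds x hy
    omega
  · exact absurd hy h
  · have h1 := PySem.Int.mod_nonneg x hy
    have h2 := PySem.Int.mod_lt x hy
    omega

-- while(y): x,y = y,x%y ; return x   (Python '%': PySem.Int.mod)
def pvLfactor (x y : Int) : Int :=
  if h : y = 0 then x
  else pvLfactor y (PySem.Int.mod x y)
termination_by y.natAbs
decreasing_by exact pvModNatAbsLt x y h

-- lf = abs(lfactor(x,y)); int(x/lf) truncates toward zero (Int.tdiv); exact here since lf
-- divides x and |x| ≤ 2^31 keeps the float division exact.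
def pvReduceOffset (x y : Int) : Int × Int :=
  let lf : Int := (pvLfactor x y).natAbs
  (Int.tdiv x lf, Int.tdiv y lf)

def remove_hidden (noff : Int × Int) (ast : Int × Int) (relship : List (Int × Int × Int)) (xlen : Int) (ylen : Int) : List (Int × Int × Int) :=
  let off := pvReduceOffset noff.1 noff.2
  let st := (PySem.List.pyRange 0 (max xlen ylen) 1).foldl
    (fun (s : Int × Int × List (Int × Int × Int)) _ =>
      let xg := s.1 + off.1
      let yg := s.2.1 + off.2
      let r := s.2.2
      if r.any (fun e => e.1 == xg && e.2.1 == yg)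
      then (xg, yg, r.filter (fun e => !(e.1 == xg && e.2.1 == yg)))
      else (xg, yg, r))
    (ast.1, ast.2, relship)
  st.2.2

-- ===== PORT B =====

-- k,r = divmod(d, off); key is on the ray iff r == 0, 1 <= k <= m and both components match.
def pvOnRay (xoff yoff m : Int) (ast : Int × Int) (gx gy : Int) : Bool :=
  let dx := gx - ast.1
  let dy := gy - ast.2
  let kr := if xoff ≠ 0 then (PySem.Int.floordiv dx xoff, PySem.Int.mod dx xoff)
            else (PySem.Int.floordiv dy yoff, PySem.Int.mod dy yoff)
  kr.2 == 0 && 1 ≤ kr.1 && kr.1 ≤ m && dx == kr.1 * xoff && dy == kr.1 * yoff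

def remove_hidden_alt (noff : Int × Int) (ast : Int × Int) (relship : List (Int × Int × Int)) (xlen : Int) (ylen : Int) : List (Int × Int × Int) :=
  let off := pvReduceOffset noff.1 noff.2
  let m := max xlen ylen
  relship.filter (fun e => !(pvOnRay off.1 off.2 m ast e.1 e.2.1))

-- ===== PRECONDITION & SPEC =====
-- Pre_ excludes only noff = (0,0), on which A raises ZeroDivisionError in reduce_offset.
def Pre_remove_hidden (noff : Int × Int) (ast : Int × Int) (relship : List (Int × Int × Int)) (xlen : Int) (ylen : Int) : Prop := noff.1 ≠ 0 ∨ noff.2 ≠ 0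
instance (noff : Int × Int) (ast : Int × Int) (relship : List (Int × Int × Int)) (xlen : Int) (ylen : Int) : Decidable (Pre_remove_hidden noff ast relship xlen ylen) := by unfold Pre_remove_hidden; infer_instance
def pvWitness_remove_hidden : (Int × Int) × (Int × Int) × (List (Int × Int × Int)) × Int × Int := ((1, 1), (0, 0), [(1, 1, 7), (2, 2, 8), (2, 1, 9)], 3, 3)

def Spec_remove_hidden (noff : Int × Int) (ast : Int × Int) (relship : List (Int × Int × Int)) (xlen : Int) (ylen : Int) (out : List (Int × Int × Int)) : Prop := out = remove_hidden_alt noff ast relship xlen ylen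
instance (noff : Int × Int) (ast : Int × Int) (relship : List (Int × Int × Int)) (xlen : Int) (ylen : Int) (out : List (Int × Int × Int)) : Decidable (Spec_remove_hidden noff ast relship xlen ylen out) := by unfold Spec_remove_hidden; infer_instance

-- ===== CLAIM (what is proved, stated in full; the proofs are below) =====
def Claim_equal_remove_hidden : Prop := ∀ (noff : Int × Int) (ast : Int × Int) (relship : List (Int × Int × Int)) (xlen : Int) (ylen : Int), Dom_remove_hidden noff ast relship xlen ylen → Pre_remove_hidden noff ast relship xlen ylen → Spec_remove_hidden noff ast relship xlen ylen (remove_hidden noff ast relship xlen ylen)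

-- ===== LEMMAS AND PROOFS =====

-- Boolean "the key e is hidden within the next n steps of the ray starting at (a,b)".
def pvHitF (xoff yoff : Int) : Int → Int → Nat → Int × Int × Int → Bool
  | _, _, 0, _ => false
  | a, b, n+1, e => (e.1 == a + xoff && e.2.1 == b + yoff) || pvHitF xoff yoff (a + xoff) (b + yoff) n e

-- A's fold deletes exactly the keys pvHitF describes.
theorem pvFoldEq (xoff yoff : Int) (l : List Int) : ∀ (a b : Int) (r : List (Int × Int × Int)),
    (l.foldl (fun (s : Int × Int × List (Int × Int × Int)) _ =>
      let xg := s.1 + xoff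
      let yg := s.2.1 + yoff
      let r := s.2.2
      if r.any (fun e => e.1 == xg && e.2.1 == yg)
      then (xg, yg, r.filter (fun e => !(e.1 == xg && e.2.1 == yg)))
      else (xg, yg, r)) (a, b, r)).2.2
    = r.filter (fun e => !pvHitF xoff yoff a b l.length e) := by
  induction l with
  | nil =>
    intro a b r
    simp [pvHitF]
  | cons hd tl ih =>
    intro a b r
    simp only [List.foldl_cons, List.length_cons]
    by_cases hany : r.any (fun e => e.1 == a + xoff && e.2.1 == b + yoff)
    · simp only [hany, if_true]
      rw [ih, List.filter_filter]
      refine List.filter_congr ?_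
      intro e _
      simp [pvHitF, Bool.not_or, Bool.and_comm]
    · simp only [hany]
      rw [ih]
      refine List.filter_congr ?_
      intro e he
      have hne : (e.1 == a + xoff && e.2.1 == b + yoff) = false := by
        refine Bool.eq_false_iff.mpr ?_
        intro hc
        exact hany (List.any_eq_true.mpr ⟨e, he, hc⟩)
      simp [pvHitF, hne]

theorem pvHitF_iff (xoff yoff : Int) : ∀ (n : Nat), ∀ (a b : Int) (e : Int × Int × Int),
    pvHitF xoff yoff a b n e = true ↔
      ∃ k : Nat, k < n ∧ e.1 = a + ((k : Int) + 1) * xoff ∧ e.2.1 = b + ((k : Int) + 1) * yoff := by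
  intro n
  induction n with
  | zero => intro a b e; simp [pvHitF]
  | succ n ih =>
    intro a b e
    simp only [pvHitF, Bool.or_eq_true, beq_iff_eq, Bool.and_eq_true, ih]
    constructor
    · rintro (⟨h1, h2⟩ | ⟨k, hk, h1, h2⟩)
      · exact ⟨0, by omega, by simpa using h1, by simpa using h2⟩
      · exact ⟨k + 1, by omega, by push_cast; linarith [h1], by push_cast; linarith [h2]⟩
    · rintro ⟨k, hk, h1, h2⟩
      cases k with
      | zero => exact Or.inl ⟨by simpa using h1, by simpa using h2⟩
      | succ k =>
        refine Or.inr ⟨k, by omega, ?_, ?_⟩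
        · push_cast at h1 ⊢; linarith [h1]
        · push_cast at h2 ⊢; linarith [h2]

theorem pvFloordivMulSelf (k b : Int) (hb : b ≠ 0) :
    PySem.Int.floordiv (k * b) b = k ∧ PySem.Int.mod (k * b) b = 0 := by
  have hm : PySem.Int.mod (k * b) b = 0 := (PySem.Int.mod_eq_zero_iff_dvd _ _).mpr ⟨k, mul_comm k b⟩
  have h := PySem.Int.floordiv_mul_add_mod (k * b) b
  rw [hm, add_zero] at h
  exact ⟨mul_right_cancel₀ hb h, hm⟩

theorem pvOnRay_iff (xoff yoff m : Int) (ast : Int × Int) (gx gy : Int)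
    (hoff : xoff ≠ 0 ∨ yoff ≠ 0) :
    pvOnRay xoff yoff m ast gx gy = true ↔
      ∃ k : Int, 1 ≤ k ∧ k ≤ m ∧ gx = ast.1 + k * xoff ∧ gy = ast.2 + k * yoff := by
  by_cases hx : xoff = 0
  · have hy : yoff ≠ 0 := by tauto
    simp only [pvOnRay, hx, ne_eq, not_true_eq_false, if_false, beq_iff_eq, Bool.and_eq_true,
      decide_eq_true_eq]
    constructor
    · rintro ⟨⟨⟨⟨hm, h1⟩, h2⟩, hdx⟩, hdy⟩
      exact ⟨PySem.Int.floordiv (gy - ast.2) yoff, h1, h2, by linarith [hdx], by linarith [hdy]⟩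
    · rintro ⟨k, h1, h2, hgx, hgy⟩
      have hdy : gy - ast.2 = k * yoff := by linarith [hgy]
      obtain ⟨hq, hm⟩ := pvFloordivMulSelf k yoff hy
      rw [hdy, hq, hm]
      refine ⟨⟨⟨⟨rfl, h1⟩, h2⟩, by linarith [hgx]⟩, by linarith [hgy]⟩
  · simp only [pvOnRay, hx, ne_eq, not_false_eq_true, if_true, beq_iff_eq, Bool.and_eq_true,
      decide_eq_true_eq]
    constructor
    · rintro ⟨⟨⟨⟨hm, h1⟩, h2⟩, hdx⟩, hdy⟩
      exact ⟨PySem.Int.floordiv (gx - ast.1) xoff, h1, h2, by linarith [hdx], by linarith [hdy]⟩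
    · rintro ⟨k, h1, h2, hgx, hgy⟩
      have hdx : gx - ast.1 = k * xoff := by linarith [hgx]
      obtain ⟨hq, hm⟩ := pvFloordivMulSelf k xoff hx
      rw [hdx, hq, hm]
      refine ⟨⟨⟨⟨rfl, h1⟩, h2⟩, by linarith [hgx]⟩, by linarith [hgy]⟩

theorem pvLfactor_dvd (x y : Int) : pvLfactor x y ∣ x ∧ pvLfactor x y ∣ y := by
  induction x, y using pvLfactor.induct with
  | case1 x => rw [pvLfactor]; simp
  | case2 x y h ih =>
    rw [pvLfactor]
    simp only [h, dite_false]
    obtain ⟨d1, d2⟩ := ih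
    constructor
    · have hdx : pvLfactor y (PySem.Int.mod x y) ∣
          PySem.Int.floordiv x y * y + PySem.Int.mod x y :=
        dvd_add (Dvd.dvd.mul_left d1 _) d2
      rwa [PySem.Int.floordiv_mul_add_mod] at hdx
    · exact d1

theorem pvReduceOffset_nonzero (x y : Int) (h : x ≠ 0 ∨ y ≠ 0) :
    (pvReduceOffset x y).1 ≠ 0 ∨ (pvReduceOffset x y).2 ≠ 0 := by
  obtain ⟨d1, d2⟩ := pvLfactor_dvd x y
  have hlf : pvLfactor x y ≠ 0 := by
    intro h0
    rw [h0] at d1 d2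
    rcases h with h | h
    · exact h (zero_dvd_iff.mp d1)
    · exact h (zero_dvd_iff.mp d2)
  have hlfn : ((pvLfactor x y).natAbs : Int) ≠ 0 := by
    simpa using hlf
  have hd1 : ((pvLfactor x y).natAbs : Int) ∣ x := (Int.natAbs_dvd).mpr d1
  have hd2 : ((pvLfactor x y).natAbs : Int) ∣ y := (Int.natAbs_dvd).mpr d2
  rcases h with h | h
  · left
    simp only [pvReduceOffset]
    intro h0
    have := Int.tdiv_mul_cancel hd1
    rw [h0, zero_mul] at this
    exact h this.symm
  · right
    simp only [pvReduceOffset]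
    intro h0
    have := Int.tdiv_mul_cancel hd2
    rw [h0, zero_mul] at this
    exact h this.symm

-- ===== VERDICT (by name: the statement is the Claim_ definition above) =====
theorem remove_hidden_spec : Claim_equal_remove_hidden := by
  intro noff ast relship xlen ylen _ hpre
  unfold Spec_remove_hidden remove_hidden remove_hidden_alt
  set off := pvReduceOffset noff.1 noff.2 with hoffdef
  set m := max xlen ylen with hm
  rw [pvFoldEq off.1 off.2 (PySem.List.pyRange 0 m 1) ast.1 ast.2 relship]
  refine List.filter_congr ?_
  intro e _
  have hoff : off.1 ≠ 0 ∨ off.2 ≠ 0 := pvReduceOffset_nonzero noff.1 noff.2 hpre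
  have hlen : (PySem.List.pyRange 0 m 1).length = m.toNat := by
    rw [PySem.List.length_pyRange_one]; simp
  rw [hlen]
  congr 1
  rw [Bool.eq_iff_iff, pvHitF_iff, pvOnRay_iff off.1 off.2 m ast e.1 e.2.1 hoff]
  constructor
  · rintro ⟨k, hk, h1, h2⟩
    refine ⟨(k : Int) + 1, by omega, by omega, by linarith [h1], by linarith [h2]⟩
  · rintro ⟨k, h1, h2, hgx, hgy⟩
    refine ⟨(k - 1).toNat, by omega, ?_, ?_⟩
    · have : ((k - 1).toNat : Int) + 1 = k := by omega
      rw [this]; linarith [hgx]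
    · have : ((k - 1).toNat : Int) + 1 = k := by omega
      rw [this]; linarith [hgy]
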